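/- GENERATED by mk_final_copies.py from the proof of the farm's unit `start_decoder.R13` (farm:start_decoder.R13.1: Lemmas.lean) as the
   re-elaboration sweep compiled it — do not edit. -/
import Asan.CheckWalk
import Vorbis.Spec.StartDecoderBTest
import Vorbis.Spec.Units.start_decoder_R13

/-!
  Lemmas of the unit `start_decoder.R13` (the head of the mode loop 4143; after it `flush_packet(f)`, `f->previous_length = 0`,
  `i = 0`). Pure logic over the assertions of Vorbis/Spec/StartDecoderB.lean: no machine walk here.

      obj_where      where `*f` is at start_decoder time (off the own stack, off `log2_4`)
      frame_carry    the common part `Frame` at the next cut point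
      mid_next       `Mid g 8 8 9` with `ModeOK` is `Mid g 9 9 10` (SD.9)
      cmp_counter    the loop counter `i ≤ 64` as the signed 32-bit operand of the `cmp`
      OffWin         where the segment may store
      exit_R14       the exit 0x11655f (`i < mode_count`)
      exit_R15       the exit 0x115f97 (SD.9, `previous_length = 0`, `i = 0`)
-/

open X86 X86.User Asan Vorbis Vorbis.Spec Vorbis.Spec.StartDecoder

set_option maxRecDepth 4000
set_option maxHeartbeats 4000000

namespace Vorbis.Spec.start_decoder_R13

/-- Where the decoder object `*f` is at start_decoder time: above the text, inside the data space, off the function's own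
stack `[RA − 1888, RA + 8)` (it is an object of a CALLER's protected frame, or no stack object at all), and off the global
`log2_4` (another block of the run's predicate). -/
theorem obj_where {u₀ : State} {g : Ghost} {pc : Word} {A : Arena × List Obj} {v : State} {k kc z : Nat} {Ac : Arena}
    {mem : Mem} (hfr : Frame u₀ g pc A v) (hh : g.Hand A) (hmid : Mid g k kc z Ac A mem) :
    0x119d40 ≤ g.f ∧ g.f + 1808 ≤ 0xC00000 ∧
      (g.RA + 8 ≤ g.f ∨ g.f + 1808 ≤ 0x700000 ∨ 0x800000 ≤ g.f) ∧
      (g.f + 1808 ≤ 0x120640 ∨ 0x120650 ≤ g.f) := by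
  have hobj : LiveIn A.2 g.frames' g.f Off.sizeof.stb_vorbis := hh.obj.mono (frames'_sub g A.2)
  have hw := hobj.where_ hfr.shadow hfr.offText (by decide)
  simp only [Off.sizeof.stb_vorbis] at hw
  obtain ⟨hw1, hw2, _⟩ := hw
  refine ⟨hw1, hw2, ?_, ?_⟩
  · -- off the own stack: the object that holds `*f`
    obtain ⟨o, ho, h1, h2⟩ := hh.obj
    simp only [Off.sizeof.stb_vorbis] at h2
    rcases List.mem_append.mp ho with hs | hoth
    · left
      unfold stackObjs at hs
      obtain ⟨bF, hbF, hin⟩ := List.mem_flatMap.mp hs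
      have hbF' : bF ∈ g.frames' := List.mem_cons_of_mem _ hbF
      obtain ⟨k1, k2, _, _, _⟩ := hfr.shadow.stack.active bF hbF'
      have hg := FrameLayout.objsAt_gran k1 k2 hin
      have hc := hfr.callers bF hbF
      have e : o.gLo = o.base / 8 := rfl
      omega
    · right
      have := hfr.shadow.off o hoth
      unfold OffStack at this
      omega
  · -- off `log2_4`: two blocks of the run's predicate
    have hB : g.Blk A (objBlock g.f) := hmid.bits.OB1
    have hC : g.Blk A ⟨0x120640, 16⟩ := by
      apply runBlk_extra
      simp only [fixedBlocks, globalBlocks, List.mem_cons, List.mem_nil_iff, true_or, or_true]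
    have hne : objBlock g.f ≠ ⟨0x120640, 16⟩ := by
      intro e
      have := congrArg Block.size e
      simp only [objBlock, Off.sizeof.stb_vorbis] at this
      omega
    have hd := hmid.env.ok.disjoint hB hC hne
    simp only [vblock, Off.sizeof.stb_vorbis] at hd
    omega

/-- **The common part `Frame` at the next cut point**: the steady stack pointer, `abiInv`, the code span and — about the memory —
(a) the frame's slots `[R + 8, RA + 8)` read the same, (b) the shadow and (c) the global `log2_4` were not written, (d) every
store since the last cut point went into the function's footprint. -/
theorem frame_carry {u₀ : State} {g : Ghost} {pc pc' : Word} {A : Arena × List Obj} {v s : State}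
    (h : Frame u₀ g pc A v) (hrip : s.rip = pc') (hrsp : s.reg .rsp = addr g.R) (hinv : abiInv s)
    (hcode : CodeOK u₀ s.mem) (heq : Mem.EqOn (g.R + 8) (g.R + 1488) v.mem s.mem)
    (hun : ShadowUntouched v.mem s.mem) (hlog : Mem.EqOn 0x120640 0x120650 v.mem s.mem)
    (hsame : Mem.SameExcept (footprint g) g.e.mem s.mem) : Frame u₀ g pc' A s := by
  obtain ⟨hr1, hr2⟩ := h.r_eq
  obtain ⟨_, _, hr3⟩ := h.ra
  simp only [steady] at hr1
  have hb : g.R + 1488 ≤ 2 ^ 64 := by omega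
  refine ⟨h.entry, hrip, hrsp, ?_, ?_, ?_, ?_, ?_, ?_, ?_, ?_, hcode, hinv, h.shadow.untouched hun, h.offText, h.ext,
    h.callers, ?_, hsame⟩
  · rw [heq.u64 _ (by omega) (by omega) hb]
    exact h.shadowIdx
  · rw [heq.u64 _ (by omega) (by omega) hb]
    exact h.saved_rbx
  · rw [heq.u64 _ (by omega) (by omega) hb]
    exact h.saved_rbp
  · rw [heq.u64 _ (by omega) (by omega) hb]
    exact h.saved_r12
  · rw [heq.u64 _ (by omega) (by omega) hb]
    exact h.saved_r13
  · rw [heq.u64 _ (by omega) (by omega) hb]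
    exact h.saved_r14
  · rw [heq.u64 _ (by omega) (by omega) hb]
    exact h.saved_r15
  · rw [heq.u64 _ (by omega) (by omega) hb]
    exact h.saved_ra
  · -- SH7 for `log2_4`
    intro i hi
    have e : UInt64.ofNat (Vorbis.Globals.log2_4.beg + i) = addr (0x120640 + i) := rfl
    rw [e, hlog.readLE_addr (0x120640 + i) 1 (by omega) (by omega) (by omega), ← e]
    exact h.sh7 i hi

/-- **From the mode loop's exit to SD.9**: with `ModeOK` (the loop is left: `i = mode_count`) the point `Mid g 8 8 9` is the point
`Mid g 9 9 10` — the same record (`Own 9` has no more fields than `Own 8`), Z10 no longer claimed, the zero rest from `A[]` on. -/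
theorem mid_next {g : Ghost} {Ac : Arena} {A : Arena × List Obj} {mem : Mem} (h : Mid g 8 8 9 Ac A mem)
    (hm : ModeOK mem g.f) : Mid g 9 9 10 Ac A mem := by
  refine ⟨h.env, ?_, h.arena, h.noTemps, h.extc, h.bits, h.first, h.discard0, h.header, ?_, ?_, fun _ => hm, ?_⟩
  · exact ⟨h.consts.aligned, h.consts.shadowIdx, h.consts.one20, fun hk => absurd hk (by decide),
      fun _ _ => h.consts.z24 (by decide) (by decide)⟩
  · exact ⟨fun _ => h.own.comment (by decide), fun _ => h.own.cb0 (by decide), fun _ => h.own.nonnull (by decide),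
      fun _ => h.own.books (by decide), fun _ => h.own.floor (by decide), fun _ => h.own.residue (by decide),
      fun _ => h.own.mapping (by decide)⟩
  · intro _ _
    exact h.lfl (by decide) (by decide)
  · intro o ho1 ho2
    have e9 : restFrom 9 = 868 := by decide
    have e10 : restFrom 10 = 1400 := by decide
    apply h.rest o ?_ ho2
    rw [e9]
    rw [e10] at ho1
    omega

/-- The loop counter (`r14d = i`, `i ≤ 64`) as the signed 32-bit operand of `cmp [f + 1E0H], r14d`. -/
theorem cmp_counter (i : Nat) (hi : i ≤ 64) : (Word.part .w32 (addr i)).toInt = (i : Int) := by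
  have e1 : s32 (addr i) = argInt (addr i) := s32_eq_argInt (addr i)
  have e2 : (addr i).toNat = i := toNat_addr i (by omega)
  have e3 : i % 2 ^ 32 = i := Nat.mod_eq_of_lt (by omega)
  have h := sint32_cases i
  show s32 (addr i) = (i : Int)
  rw [e1, argInt_def, e2, e3]
  omega

/-- The operand `[f + 1E0H]` of the `cmp`, a 32-bit load, as the `int` field `mode_count`. -/
theorem cmp_field (mem : Mem) (f : Nat) :
    (BitVec.ofNat 32 (mem.u32 (f + 480))).toInt = stb_vorbis.mode_count mem f := by
  rw [toInt_ofNat32 _ (mem.u32_lt _), ← Mem.i32_def]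
  simp only [vacc, voff]

/-- **Where the segment may store**: a window of the footprint of `flush_packet(f) ; f->previous_length = 0` lies in the function's
own stack below the steady stack pointer, or inside `*f` off every field the point `Mid g 9 9 10`, the arena layer and the frame
read: the bit reader's and the paging fields, `previous_length`. -/
def OffWin (g : Ghost) (w : Span) : Prop :=
  (g.RA - 1888 ≤ w.lo ∧ w.hi ≤ g.R) ∨ (g.f + 48 ≤ w.lo ∧ w.hi ≤ g.f + 112) ∨ (g.f + 136 ≤ w.lo ∧ w.hi ≤ g.f + 152) ∨
    (g.f + 868 ≤ w.lo ∧ w.hi ≤ g.f + 1400) ∨ (g.f + 1480 ≤ w.lo ∧ w.hi ≤ g.f + 1749) ∨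
    (g.f + 1750 ≤ w.lo ∧ w.hi ≤ g.f + 1784)

/-- **Exit to R14** (0x11655f, `i < mode_count`): nothing was stored, the loop's invariant moves to the new program counter. -/
theorem exit_R14 {u₀ : State} {g : Ghost} {i : Nat} {A : Arena × List Obj} {v s : State}
    (hfr : Frame u₀ g pc_R13 A v) (hhand : g.Hand A) (hmid : Mid g 8 8 9 A.1 A v.mem) (hrbp : v.reg .rbp = addr g.f)
    (hr14 : v.reg .r14 = addr i) (hile : (i : Int) ≤ stb_vorbis.mode_count v.mem g.f) (hmodes : ModeUpTo v.mem g.f i)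
    (hlt : (i : Int) < stb_vorbis.mode_count v.mem g.f)
    (hrip : s.rip = pc_R14) (hrsp : s.reg .rsp = v.reg .rsp) (hbp : s.reg .rbp = v.reg .rbp)
    (h14 : s.reg .r14 = v.reg .r14) (hinv : abiInv s) (hmem : s.mem = v.mem) : AtR14 u₀ g i s := by
  refine ⟨A, ⟨?_, hhand, ?_, ?_, ?_, ?_, ?_⟩, ?_⟩
  · refine frame_carry hfr hrip ?_ hinv ?_ ?_ ?_ ?_ ?_
    · rw [hrsp]
      exact hfr.rsp
    · rw [hmem]
      exact hfr.code
    · rw [hmem]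
      exact Mem.EqOn.refl _ _ _
    · rw [hmem]
      exact Mem.EqOn.refl _ _ _
    · rw [hmem]
      exact Mem.EqOn.refl _ _ _
    · rw [hmem]
      exact hfr.same
  · rw [hmem]
    exact hmid
  · rw [hbp]
    exact hrbp
  · rw [h14]
    exact hr14
  · rw [hmem]
    exact hile
  · rw [hmem]
    exact hmodes
  · rw [hmem]
    exact hlt

/-- **Exit to R15** (0x115f97, the mode loop is left: SD.9, then `f->previous_length = 0`, `i = 0`): the stores since the head — the
return addresses of the two calls below the steady stack pointer, flush_packet's windows of `*f`, `previous_length` — went to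
windows that are `Off`; `Bits` after flush_packet (`hbits1`) is carried over the two stores of the segment itself. The snapshot of
the channel loop is the current arena: `A9 = A.1`. -/
theorem exit_R15 {u₀ : State} {g : Ghost} {i : Nat} {A : Arena × List Obj} {v s : State} {m1 : Mem} {w1 w2 : Word} {x : Nat}
    {ws : List Span}
    (hfr : Frame u₀ g pc_R13 A v) (hhand : g.Hand A) (hmid : Mid g 8 8 9 A.1 A v.mem)
    (hmodes : ModeUpTo v.mem g.f i) (hge : stb_vorbis.mode_count v.mem g.f ≤ (i : Int))
    (hrip : s.rip = pc_R15) (hrsp : s.reg .rsp = addr g.R) (hrbp : s.reg .rbp = addr g.f) (hr14 : s.reg .r14 = addr 0)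
    (hinv : abiInv s) (hcode : CodeOK u₀ s.mem) (hbits1 : Bits (g.Blk A) g.len m1 g.f)
    (hmem : s.mem = (m1.writeLE w1 8 x).writeLE w2 4 0)
    (hw1 : g.RA - 1888 ≤ w1.toNat ∧ w1.toNat + 8 ≤ g.R) (hw2 : w2 = addr (g.f + 1256))
    (hS : Mem.SameExcept ws v.mem s.mem) (hoff : ∀ w, w ∈ ws → OffWin g w) : AtR15 u₀ g 0 s := by
  -- the numbers
  obtain ⟨hR1, hR8⟩ := hfr.r_eq
  obtain ⟨_, hRAlo, hRAhi⟩ := hfr.ra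
  simp only [steady] at hR1
  simp only [depth] at hRAlo
  obtain ⟨hf1, hf2, hf3, hf4⟩ := obj_where hfr hhand hmid
  have hobjOut := hhand.objOut
  simp only [Off.sizeof.stb_vorbis] at hobjOut
  -- what the stores left alone
  have heq : Mem.EqOn (g.R + 8) (g.R + 1488) v.mem s.mem := by
    apply hS.eqOn
    intro w hw
    have := hoff w hw
    unfold OffWin at this
    omega
  have hun : ShadowUntouched v.mem s.mem := by
    apply hS.eqOn
    intro w hw
    have := hoff w hw
    unfold OffWin at this
    omega
  have hlog : Mem.EqOn 0x120640 0x120650 v.mem s.mem := by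
    apply hS.eqOn
    intro w hw
    have := hoff w hw
    unfold OffWin at this
    omega
  have harenaEq : Mem.EqOn (g.f + 112) (g.f + 136) v.mem s.mem := by
    apply hS.eqOn
    intro w hw
    have := hoff w hw
    unfold OffWin at this
    omega
  have hfoot : Mem.SameExcept (footprint g) g.e.mem s.mem := by
    apply hfr.same.step_same hS
    intro w hw a ha1 ha2
    have := hoff w hw
    unfold OffWin at this
    rcases this with hst | hob
    · refine ⟨⟨g.RA - depth, g.RA⟩, List.mem_cons_self, ?_, ?_⟩
      · simp only [depth]
        omega
      · simp only []
        omega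
    · refine ⟨(objBlock (g.e.reg .rdi).toNat).span, List.mem_cons_of_mem _ List.mem_cons_self, ?_, ?_⟩
      · have e : g.f = (g.e.reg .rdi).toNat := rfl
        simp only [vblock]
        omega
      · have e : g.f = (g.e.reg .rdi).toNat := rfl
        simp only [vblock, Off.sizeof.stb_vorbis]
        omega
  have hfr' : Frame u₀ g pc_R15 A s := frame_carry hfr hrip hrsp hinv hcode heq hun hlog hfoot
  -- SD.9 at the loop head, then carried over the stores
  have hmode : ModeOK v.mem g.f := hmodes.toOK (by have := hmodes.n_le; omega)
  have hmid9 : Mid g 9 9 10 A.1 A v.mem := mid_next hmid hmode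
  have ehi : Mid.hi 9 = 868 := by decide
  have erest : restFrom 10 = 1400 := by decide
  have hobjEq : ObjEq (Mid.winsAt 9 10) v.mem g.f s.mem g.f := by
    apply ObjEq.of_sameExcept hS
    · intro w hw
      simp only [Mid.winsAt, ehi, erest, List.mem_cons, List.mem_nil_iff, or_false] at hw
      rcases hw with rfl | rfl | rfl | rfl | rfl | rfl
      all_goals
        simp only []
        omega
    · intro w hw sp hsp
      have := hoff sp hsp
      unfold OffWin at this
      simp only [Mid.winsAt, ehi, erest, List.mem_cons, List.mem_nil_iff, or_false] at hw
      rcases hw with rfl | rfl | rfl | rfl | rfl | rfl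
      all_goals
        simp only []
        omega
  have hkept : ∀ B, A.1.Blk B → B.Kept v.mem s.mem := by
    apply AllKept.of_sameExcept hmid.arena.blkOK hS
    intro B hB w hw
    have := hoff w hw
    unfold OffWin at this
    have hin := arena_inside hmid.arena hB
    have hst := hmid.arena.blk_off_stack hB
    omega
  have hconsts : SDFrameConsts 9 s.mem g.R :=
    hmid9.consts.frame (heq.mono (Nat.le_refl _) (by omega)) (by omega)
  have hslot : 6 ≤ 9 → 9 ≤ 9 → s.mem.i32 (g.R + 0x28) = v.mem.i32 (g.R + 0x28) := by
    intro _ _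
    exact heq.i32 _ (by omega) (by omega) (by omega)
  have harena : ArenaOK A.1 A.2 s.mem g.f := by
    apply hmid.arena.frame
    · simp only [Off.sizeof.stb_vorbis]
      omega
    · simp only [voff]
      exact harenaEq
  have hbits : Bits (g.Blk A) g.len s.mem g.f := by
    rw [hmem, hw2]
    apply hbits1.frame_fields
    apply Bits.SameFields.trans
    · exact Bits.SameFields.of_writeLE_word m1 g.f w1 8 x (by omega) (by omega) (by omega) (by omega) (by omega)
    · exact Bits.SameFields.of_writeLE _ g.f (g.f + 1256) 4 0 (by omega) (by omega) (by omega) (by omega) (by omega)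
  have hmid' : Mid g 9 9 10 A.1 A s.mem := hmid9.frame hobjEq hkept hconsts hslot hun harena hbits
  -- the assertion
  refine ⟨A.1, A, hfr', hhand, hmid', hrbp, hr14, ?_, ?_, ?_, ?_⟩
  · have := hmid'.header.HD1
    omega
  · rw [hmem, hw2]
    simp only [vacc, voff]
    rw [Mem.i32_writeLE_same]
    decide
  · exact Mdct.ChanUpTo.zero _ _ _
  · exact FYUpTo.zero _ _ _ _

end Vorbis.Spec.start_decoder_R13
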